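-- pv_equiv track=rewrite | github.com/edimarzo/tp-lights-out | casillero.py | filaCheck
-- ===== SOURCE A (Python) =====
-- def filaCheck(y,mapa):
--     """Recibe valor de fila seleccionado por el usuario. Devuelve True si valor existe o False en caso contrario"""
--
--     ctdadFilas = len(mapa)
--     ctdadFilas = int(ctdadFilas)
--     #y = int(y)
--     valoresFilas = []
--
--     for valor in range (1,ctdadFilas):
--         valoresFilas.append(str(valor))
--     if y in valoresFilas:
--         return True
--     else:
--         return False
-- ===== SOURCE B (Python) =====
-- def filaCheck(y, mapa):
--     """Recibe valor de fila seleccionado por el usuario. Devuelve True si valor existe o False en caso contrario"""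
--     # A valid row label is exactly the canonical decimal form of some k with
--     # 1 <= k < len(mapa): non-empty, no leading zero, digits only, value < len(mapa).
--     if y == "" or y[0] == '0':
--         return False
--     k = 0
--     for c in y:
--         if not ('0' <= c <= '9'):
--             return False
--         k = 10 * k + (ord(c) - 48)
--     return k < len(mapa)
-- ===== Notes on version B (the rewrite author's own statement) =====
-- stated objective: faster
-- what changed: Instead of materialising the list of all row labels str(1)..str(len(mapa)-1) and scanning it for y, B parses y itself (digits only, no leading zero) and compares the parsed value against len(mapa).
import Mathlib
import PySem

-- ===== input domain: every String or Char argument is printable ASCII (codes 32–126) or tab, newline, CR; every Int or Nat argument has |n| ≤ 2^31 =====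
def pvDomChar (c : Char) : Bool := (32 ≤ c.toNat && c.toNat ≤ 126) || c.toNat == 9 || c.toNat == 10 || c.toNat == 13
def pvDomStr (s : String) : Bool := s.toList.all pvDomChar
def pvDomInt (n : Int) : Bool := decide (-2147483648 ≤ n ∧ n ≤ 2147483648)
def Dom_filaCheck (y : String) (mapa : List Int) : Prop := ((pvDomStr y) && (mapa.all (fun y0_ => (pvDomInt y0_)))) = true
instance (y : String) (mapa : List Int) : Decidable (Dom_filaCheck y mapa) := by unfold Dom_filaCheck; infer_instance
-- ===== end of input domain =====

-- B replaces A's materialised list of all row labels str(1)..str(len(mapa)-1) by parsing y itself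
-- (digits, no leading zero) and comparing the parsed value with len(mapa); objective: faster.


-- ===== PORT A =====
def filaCheck (y : String) (mapa : List Int) : Bool :=
  let ctdadFilas : Int := PySem.List.len mapa
  let valoresFilas : List String :=
    (PySem.List.pyRange 1 ctdadFilas 1).foldl (fun acc valor => acc ++ [PySem.Int.toStr valor]) []
  if valoresFilas.contains y then true else false

-- ===== PORT B =====
-- B's loop: scan the characters of y, reject a non-digit, accumulate the decimal value.
def filaCheckLoop (cs : List Char) (k : Int) (n : Int) : Bool :=
  match cs with
  | [] => decide (k < n)
  | c :: rest =>
      if '0' ≤ c && c ≤ '9' then filaCheckLoop rest (10 * k + ((c.toNat : Int) - 48)) n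
      else false

def filaCheck_alt (y : String) (mapa : List Int) : Bool :=
  match y.toList with
  | [] => false
  | c :: rest =>
      if c = '0' then false
      else filaCheckLoop (c :: rest) 0 (PySem.List.len mapa)

-- ===== PRECONDITION & SPEC =====
def Spec_filaCheck (y : String) (mapa : List Int) (out : Bool) : Prop := out = filaCheck_alt y mapa
instance (y : String) (mapa : List Int) (out : Bool) : Decidable (Spec_filaCheck y mapa out) := by unfold Spec_filaCheck; infer_instance

-- ===== CLAIM (what is proved, stated in full; the proofs are below) =====
def Claim_equal_filaCheck : Prop := ∀ (y : String) (mapa : List Int), Dom_filaCheck y mapa → Spec_filaCheck y mapa (filaCheck y mapa)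

-- ===== LEMMAS AND PROOFS =====

-- Canonical decimal representation of a natural number (mirrors Nat.toDigitsCore without fuel).
def pvRep (m : Nat) : List Char :=
  if _h : m < 10 then [Nat.digitChar m]
  else pvRep (m / 10) ++ [Nat.digitChar (m % 10)]
decreasing_by exact Nat.div_lt_self (by omega) (by omega)

-- B's accumulator, on Nat.
def pvVal (a : Nat) (cs : List Char) : Nat :=
  cs.foldl (fun a c => 10 * a + (c.toNat - 48)) a

theorem pvVal_append (a : Nat) (xs ys : List Char) :
    pvVal a (xs ++ ys) = pvVal (pvVal a xs) ys := by
  simp [pvVal, List.foldl_append]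

theorem char_toNat_inj (c d : Char) (h : c.toNat = d.toNat) : c = d := by
  apply Char.ext
  apply UInt32.toNat_inj.mp h

theorem pvDig_iff (c : Char) : ('0' ≤ c && c ≤ '9') = true ↔ 48 ≤ c.toNat ∧ c.toNat ≤ 57 := by
  rw [Bool.and_eq_true, decide_eq_true_iff, decide_eq_true_iff]
  rw [Char.le_def, Char.le_def, UInt32.le_iff_toNat_le, UInt32.le_iff_toNat_le]
  rfl

theorem digitChar_isDig (d : Nat) (h : d < 10) : ('0' ≤ Nat.digitChar d && Nat.digitChar d ≤ '9') = true := by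
  interval_cases d <;> decide

theorem digitChar_toNat (d : Nat) (h : d < 10) : (Nat.digitChar d).toNat = d + 48 := by
  interval_cases d <;> decide

theorem digitChar_of_toNat (c : Char) (h1 : 48 ≤ c.toNat) (h2 : c.toNat ≤ 57) :
    Nat.digitChar (c.toNat - 48) = c := by
  apply char_toNat_inj
  rw [digitChar_toNat (c.toNat - 48) (by omega)]
  omega

theorem pvRep_ne_nil (m : Nat) : pvRep m ≠ [] := by
  unfold pvRep; split <;> simp

theorem pvRep_digits (m : Nat) : ∀ c ∈ pvRep m, ('0' ≤ c && c ≤ '9') = true := by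
  induction m using Nat.strong_induction_on with
  | _ m ih =>
    unfold pvRep
    split
    · next h => intro c hc; simp at hc; subst hc; exact digitChar_isDig m h
    · next h =>
      intro c hc
      simp only [List.mem_append, List.mem_singleton] at hc
      rcases hc with hc | hc
      · exact ih (m / 10) (Nat.div_lt_self (by omega) (by omega)) c hc
      · subst hc; exact digitChar_isDig (m % 10) (Nat.mod_lt _ (by omega))

theorem pvVal_pvRep (m : Nat) : pvVal 0 (pvRep m) = m := by
  induction m using Nat.strong_induction_on with
  | _ m ih =>
    unfold pvRep
    split
    · next h => simp [pvVal, digitChar_toNat m h]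
    · next h =>
      rw [pvVal_append, ih (m / 10) (Nat.div_lt_self (by omega) (by omega))]
      simp [pvVal, digitChar_toNat (m % 10) (Nat.mod_lt _ (by omega))]
      omega

theorem pvRep_head_ne_zero (m : Nat) (hm : 1 ≤ m) (h : Char) (t : List Char)
    (he : pvRep m = h :: t) : h ≠ '0' := by
  induction m using Nat.strong_induction_on generalizing h t with
  | _ m ih =>
    rw [pvRep] at he
    split at he
    · next hlt =>
      simp at he
      rcases he with ⟨he1, _⟩
      subst he1
      intro hc
      have := digitChar_toNat m hlt
      rw [hc] at this
      simp [Char.toNat] at this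
      omega
    · next hlt =>
      rcases hq : pvRep (m / 10) with _ | ⟨h', t'⟩
      · exact absurd hq (pvRep_ne_nil _)
      · rw [hq] at he
        simp at he
        rcases he with ⟨he1, _⟩
        subst he1
        exact ih (m / 10) (Nat.div_lt_self (by omega) (by omega)) (by omega) h' t' hq

theorem pvVal_ge (a : Nat) (cs : List Char) : a ≤ pvVal a cs := by
  induction cs generalizing a with
  | nil => simp [pvVal]
  | cons c rest ih =>
    have := ih (10 * a + (c.toNat - 48))
    simp [pvVal] at this ⊢
    omega

theorem pvVal_pos (c : Char) (rest : List Char) (hdig : ('0' ≤ c && c ≤ '9') = true)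
    (hz : c ≠ '0') : 1 ≤ pvVal 0 (c :: rest) := by
  have hb := (pvDig_iff c).mp hdig
  have hcz : c.toNat ≠ 48 := by
    intro hcc
    exact hz (char_toNat_inj c '0' (by simpa using hcc))
  have h1 : pvVal 0 (c :: rest) = pvVal (c.toNat - 48) rest := by
    simp [pvVal]
  rw [h1]
  have := pvVal_ge (c.toNat - 48) rest
  omega

-- converse: a canonical digit string is pvRep of its value
theorem pvRep_pvVal (cs : List Char) (hd : ∀ c ∈ cs, ('0' ≤ c && c ≤ '9') = true)
    (hne : cs ≠ []) (hz : cs.head? ≠ some '0') : pvRep (pvVal 0 cs) = cs := by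
  induction cs using List.reverseRecOn with
  | nil => exact absurd rfl hne
  | append_singleton xs c ih =>
    have hcdig : 48 ≤ c.toNat ∧ c.toNat ≤ 57 :=
      (pvDig_iff c).mp (hd c (by simp))
    rcases hxs : xs with _ | ⟨h, t⟩
    · subst hxs
      have hz' : c ≠ '0' := by simpa using hz
      have hcz : c.toNat ≠ 48 := by
        intro hcc
        exact hz' (char_toNat_inj c '0' (by simpa using hcc))
      have hv : pvVal 0 ([] ++ [c]) = c.toNat - 48 := by simp [pvVal]
      rw [hv, pvRep, dif_pos (by omega)]
      simp [digitChar_of_toNat c hcdig.1 hcdig.2]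
    · subst hxs
      have hhd : ∀ d ∈ h :: t, ('0' ≤ d && d ≤ '9') = true := by
        intro d hdmem
        exact hd d (by simp at hdmem ⊢; tauto)
      have hz' : h ≠ '0' := by
        intro hh; apply hz; simp [hh]
      have hu1 : 1 ≤ pvVal 0 (h :: t) := by
        apply pvVal_pos h t (hhd h (by simp)) hz'
      have hv : pvVal 0 ((h :: t) ++ [c]) = 10 * pvVal 0 (h :: t) + (c.toNat - 48) := by
        rw [pvVal_append]; simp [pvVal]
      rw [hv, pvRep, dif_neg (by omega)]
      have h1 : (10 * pvVal 0 (h :: t) + (c.toNat - 48)) / 10 = pvVal 0 (h :: t) := by omega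
      have h2 : (10 * pvVal 0 (h :: t) + (c.toNat - 48)) % 10 = c.toNat - 48 := by omega
      rw [h1, h2, digitChar_of_toNat c hcdig.1 hcdig.2]
      rw [ih hhd (by simp) (by simpa using hz)]



theorem toDigitsCore_eq (f m : Nat) (acc : List Char) (h : m < f) :
    Nat.toDigitsCore 10 f m acc = pvRep m ++ acc := by
  induction f generalizing m acc with
  | zero => omega
  | succ f ih =>
    rw [Nat.toDigitsCore]
    by_cases hm : m < 10
    · have h10 : m / 10 = 0 := Nat.div_eq_of_lt hm
      rw [if_pos h10]
      rw [pvRep, dif_pos hm]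
      have : m % 10 = m := Nat.mod_eq_of_lt hm
      simp [this]
    · have h10 : m / 10 ≠ 0 := by
        intro hq
        exact hm (by omega)
      have hdlt : m / 10 < m := Nat.div_lt_self (by omega) (by omega)
      rw [if_neg h10]
      rw [ih (m / 10) _ (by omega)]
      conv_rhs => rw [pvRep, dif_neg hm]
      simp

theorem toChars_eq_pvRep (v : Int) (hv : 0 ≤ v) : PySem.Int.toChars v = pvRep v.toNat := by
  rw [PySem.Int.toChars, if_neg (by omega)]
  rw [Nat.toDigits, toDigitsCore_eq (v.toNat + 1) v.toNat [] (by omega)]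
  simp

theorem loop_spec (cs : List Char) (k : Nat) (n : Int) :
    filaCheckLoop cs (k : Int) n =
      if cs.all (fun c => '0' ≤ c && c ≤ '9') then decide ((pvVal k cs : Int) < n) else false := by
  induction cs generalizing k with
  | nil => simp [filaCheckLoop, pvVal]
  | cons c rest ih =>
    rw [filaCheckLoop]
    by_cases hc : ('0' ≤ c && c ≤ '9') = true
    · rw [if_pos hc]
      have hb := (pvDig_iff c).mp hc
      have : 10 * (k : Int) + ((c.toNat : Int) - 48) = ((10 * k + (c.toNat - 48) : Nat) : Int) := by
        push_cast; omega
      rw [this, ih]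
      simp only [List.all_cons, hc, Bool.true_and, pvVal, List.foldl_cons]
      rfl
    · rw [if_neg hc]
      simp [List.all_cons, hc]

theorem foldl_app_eq_map (l : List Int) (acc : List String) :
    l.foldl (fun acc valor => acc ++ [PySem.Int.toStr valor]) acc = acc ++ l.map PySem.Int.toStr := by
  induction l generalizing acc with
  | nil => simp
  | cons x xs ih => simp [List.foldl_cons, ih]

theorem toStr_eq_iff (v : Int) (y : String) : PySem.Int.toStr v = y ↔ PySem.Int.toChars v = y.toList := by
  constructor
  · intro h; rw [← h, PySem.Int.toList_toStr]
  · intro h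
    have : (PySem.Int.toStr v).toList = y.toList := by rw [PySem.Int.toList_toStr, h]
    exact String.toList_inj.mp this

theorem main_eq (y : String) (mapa : List Int) : filaCheck y mapa = filaCheck_alt y mapa := by
  simp only [filaCheck, filaCheck_alt]
  rw [foldl_app_eq_map]
  rw [Bool.eq_iff_iff]
  simp only [List.nil_append, Bool.if_true_left, Bool.or_false, PySem.List.len_eq,
    decide_eq_true_iff]
  rw [List.contains_iff_mem, List.mem_map]
  constructor
  · rintro ⟨v, hvmem, hveq⟩
    rw [PySem.List.mem_pyRange_one] at hvmem
    obtain ⟨hv1, hvn⟩ := hvmem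
    have hrep : pvRep v.toNat = y.toList := by
      rw [← toChars_eq_pvRep v (by omega), ← toStr_eq_iff]; exact hveq
    rcases hy : y.toList with _ | ⟨c, rest⟩
    · rw [hy] at hrep
      exact absurd hrep (pvRep_ne_nil _)
    · rw [hy] at hrep
      have hz : c ≠ '0' := pvRep_head_ne_zero v.toNat (by omega) c rest hrep
      dsimp only
      rw [if_neg hz]
      have h0 : (0 : Int) = ((0 : Nat) : Int) := rfl
      rw [h0, loop_spec]
      have hall : ((c :: rest).all fun c => '0' ≤ c && c ≤ '9') = true := by
        rw [List.all_eq_true]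
        intro d hdm
        exact pvRep_digits v.toNat d (by rw [hrep]; exact hdm)
      rw [if_pos hall]
      have hval : pvVal 0 (c :: rest) = v.toNat := by
        rw [← hrep, pvVal_pvRep]
      rw [hval]
      simp only [decide_eq_true_iff]
      omega
  · intro hrhs
    rcases hy : y.toList with _ | ⟨c, rest⟩
    · rw [hy] at hrhs; exact absurd hrhs (by simp)
    · rw [hy] at hrhs
      dsimp only at hrhs
      by_cases hz : c = '0'
      · rw [if_pos hz] at hrhs; exact absurd hrhs (by simp)
      rw [if_neg hz] at hrhs
      have h0 : (0 : Int) = ((0 : Nat) : Int) := rfl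
      rw [h0, loop_spec] at hrhs
      by_cases hall : ((c :: rest).all fun c => '0' ≤ c && c ≤ '9') = true
      · rw [if_pos hall] at hrhs
        rw [decide_eq_true_iff] at hrhs
        have hpos : 1 ≤ pvVal 0 (c :: rest) := by
          apply pvVal_pos c rest _ hz
          rw [List.all_eq_true] at hall
          exact hall c (by simp)
        refine ⟨(pvVal 0 (c :: rest) : Int), ?_, ?_⟩
        · rw [PySem.List.mem_pyRange_one]
          constructor
          · omega
          · exact hrhs
        · rw [toStr_eq_iff, toChars_eq_pvRep _ (by omega)]
          rw [Int.toNat_natCast, hy]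
          apply pvRep_pvVal
          · rw [List.all_eq_true] at hall; exact hall
          · simp
          · simp only [List.head?_cons]
            intro hcc
            exact hz (by simpa using hcc)
      · rw [if_neg hall] at hrhs
        exact absurd hrhs (by simp)

-- ===== VERDICT (by name: the statement is the Claim_ definition above) =====
theorem filaCheck_spec : Claim_equal_filaCheck := by
  intro y mapa _
  unfold Spec_filaCheck
  exact main_eq y mapa
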